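-- pv_equiv track=rewrite | github.com/dylansevans/codestorage | official_anagram/anagram_race/anagram_lookup.py | get_all_anagrams
-- ===== SOURCE A (Python) =====
-- def get_all_anagrams(corpus:list[str])->set:
--     '''Creates a set of all unique words in a word corpus that could have been used to form an anagram pair.
--         Words which can't create any anagram pairs should not be included in the set.
--
--         Args:
--           corpus (list): A list of words which should be considered
--
--         Returns:
--           set: all unique words in wordlist which form at least 1 anagram pair
--
--         Examples
--         ----------
--         >>> get_all_anagrams(["abed","mouse", "bead", "baled", "abled", "rat", "blade"])
--         {"abed",  "abled", "baled", "bead", "blade"}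
--     '''
--     ### BEGIN SOLUTION
--     collect = {}
--     list_to_return = []
--     for stringed_word in corpus:
--         turn_into_tuple = tuple(sorted(list(stringed_word)))
--         collect[turn_into_tuple] = collect.get(turn_into_tuple, []) + [stringed_word]
--
--     for value in collect.values():
--         if len(value) > 1:
--             list_to_return += value
--         else:
--             pass
--
--     return set(list_to_return)
-- ===== SOURCE B (Python) =====
-- def get_all_anagrams(corpus: list[str]) -> set:
--     keys = [tuple(sorted(w)) for w in corpus]
--     result = set()
--     for k in dict.fromkeys(keys):
--         if keys.count(k) > 1:
--             result.update(w for w, kk in zip(corpus, keys) if kk == k)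
--     return result
-- ===== Notes on version B (the rewrite author's own statement) =====
-- stated objective: alternative
-- what changed: B replaces A's dict of per-key word lists by a flat precomputed list of sort-keys: it walks the distinct keys in first-occurrence order and, for each key occurring more than once, collects that key's words by rescanning the zipped corpus, so no per-key lists are ever accumulated.
import Mathlib
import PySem

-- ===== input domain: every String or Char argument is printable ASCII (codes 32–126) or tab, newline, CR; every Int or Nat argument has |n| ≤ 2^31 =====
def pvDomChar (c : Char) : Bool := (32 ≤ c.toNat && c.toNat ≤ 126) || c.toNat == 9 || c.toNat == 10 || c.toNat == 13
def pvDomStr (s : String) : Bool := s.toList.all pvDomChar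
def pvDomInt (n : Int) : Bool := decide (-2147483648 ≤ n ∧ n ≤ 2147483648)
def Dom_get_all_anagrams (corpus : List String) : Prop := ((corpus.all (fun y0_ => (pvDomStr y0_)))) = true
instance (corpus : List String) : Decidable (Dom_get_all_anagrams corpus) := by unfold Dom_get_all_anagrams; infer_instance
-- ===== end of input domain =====

-- B: flat key list + one rescan per distinct repeated key, instead of A's dict of per-key word lists.

-- shared helper: tuple(sorted(word)) — the anagram signature used by both Pythons
def pvKey (w : String) : List Char := PySem.List.sorted w.toList (fun c => c) false

-- ===== PORT A =====
def get_all_anagrams (corpus : List String) : List String :=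
  PySem.Set.ofList
    ((corpus.foldl
        (fun d w => d.modify (pvKey w) [] (fun v => v ++ [w]))
        (PySem.Dict.empty : PySem.Dict (List Char) (List String))).values.foldl
      (fun acc v => if v.length > 1 then acc ++ v else acc) ([] : List String))

-- ===== PORT B =====
def get_all_anagrams_alt (corpus : List String) : List String :=
  (PySem.List.dedup (corpus.map pvKey)).foldl
    (fun s k =>
      if PySem.List.count (corpus.map pvKey) k > 1 then
        PySem.Set.update s
          (((corpus.zip (corpus.map pvKey)).filter (fun p => p.2 == k)).map (fun p => p.1))
      else s)
    PySem.Set.empty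

-- ===== PRECONDITION & SPEC =====
def Spec_get_all_anagrams (corpus : List String) (out : List String) : Prop := out = get_all_anagrams_alt corpus
instance (corpus : List String) (out : List String) : Decidable (Spec_get_all_anagrams corpus out) := by unfold Spec_get_all_anagrams; infer_instance

-- ===== CLAIM (what is proved, stated in full; the proofs are below) =====
def Claim_equal_get_all_anagrams : Prop := ∀ (corpus : List String), Dom_get_all_anagrams corpus → Spec_get_all_anagrams corpus (get_all_anagrams corpus)

-- ===== LEMMAS AND PROOFS =====

-- the words of corpus carrying signature k, in corpus order
def pvGroup (corpus : List String) (k : List Char) : List String :=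
  corpus.filter (fun w => pvKey w == k)

-- A's dict, looked up: the group of k
theorem pv_getD_collect (corpus : List String) (k : List Char) :
    (corpus.foldl (fun d w => d.modify (pvKey w) [] (fun v => v ++ [w]))
      (PySem.Dict.empty : PySem.Dict (List Char) (List String))).getD k []
    = pvGroup corpus k := by
  have h : corpus.foldl (fun d w => d.modify (pvKey w) [] (fun v => v ++ [w]))
        (PySem.Dict.empty : PySem.Dict (List Char) (List String))
      = (corpus.map (fun w => (pvKey w, w))).foldl
          (fun d p => d.modify p.1 [] (fun v => v ++ [p.2])) PySem.Dict.empty := by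
    rw [List.foldl_map]
  rw [h, PySem.Dict.getD_foldl_modify_append]
  simp [pvGroup, List.filter_map, List.map_map, Function.comp_def]

-- A's dict keys are the distinct signatures, in first-occurrence order
theorem pv_keys_collect (corpus : List String) :
    (corpus.foldl (fun d w => d.modify (pvKey w) [] (fun v => v ++ [w]))
      (PySem.Dict.empty : PySem.Dict (List Char) (List String))).keys
    = PySem.Set.ofList (corpus.map pvKey) := by
  rw [PySem.Dict.keys_foldl_modify_key]
  simp [PySem.Set.update_nil_left]

theorem pv_nodup_keys_collect (corpus : List String) :
    (corpus.foldl (fun d w => d.modify (pvKey w) [] (fun v => v ++ [w]))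
      (PySem.Dict.empty : PySem.Dict (List Char) (List String))).keys.Nodup := by
  apply PySem.Dict.nodup_keys_foldl_modify_key
  simp [PySem.Dict.empty]

-- A's second loop: concatenate the groups of size > 1
theorem pv_foldl_append_if_list {α : Type} (l : List (List α)) (p : List α → Prop)
    [DecidablePred p] (acc : List α) :
    l.foldl (fun acc v => if p v then acc ++ v else acc) acc
    = acc ++ ((l.filter (fun v => decide (p v))).flatten) := by
  induction l generalizing acc with
  | nil => simp
  | cons v t ih =>
    by_cases h : p v <;> simp [h, ih, List.append_assoc]

-- B's loop: one big set-update with the selected groups concatenated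
theorem pv_foldl_update_if {κ : Type} [BEq κ] (l : List κ) (p : κ → Prop)
    [DecidablePred p] (g : κ → List String) (s : PySem.Set String) :
    l.foldl (fun s k => if p k then PySem.Set.update s (g k) else s) s
    = PySem.Set.update s ((l.filter (fun k => decide (p k))).flatMap g) := by
  induction l generalizing s with
  | nil => simp [PySem.Set.update]
  | cons k t ih =>
    by_cases h : p k <;> simp [h, ih, PySem.Set.update_append]

-- B's rescan of the zipped corpus is exactly the group of k
theorem pv_zip_filter (corpus : List String) (k : List Char) :
    ((corpus.zip (corpus.map pvKey)).filter (fun p => p.2 == k)).map (fun p => p.1)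
    = pvGroup corpus k := by
  have hz : corpus.zip (corpus.map pvKey) = corpus.map (fun w => (w, pvKey w)) := by
    induction corpus with
    | nil => rfl
    | cons w t ih => simp [ih]
  rw [hz]
  simp [pvGroup, List.filter_map, List.map_map, Function.comp_def]

-- counting a signature in the key list counts the group's length
theorem pv_count_keys (corpus : List String) (k : List Char) :
    PySem.List.count (corpus.map pvKey) k = (pvGroup corpus k).length := by
  simp only [PySem.List.count_eq, List.count_eq_countP, List.countP_map, Function.comp_def]
  simp [pvGroup, List.countP_eq_length_filter]

-- ===== VERDICT (by name: the statement is the Claim_ definition above) =====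
theorem get_all_anagrams_spec : Claim_equal_get_all_anagrams := by
  intro corpus _
  unfold Spec_get_all_anagrams get_all_anagrams get_all_anagrams_alt
  rw [pv_foldl_update_if, pv_foldl_append_if_list,
    PySem.Dict.values_eq_map_keys _ (pv_nodup_keys_collect corpus) ([] : List String),
    pv_keys_collect, PySem.List.dedup_eq_ofList]
  have he : (PySem.Set.empty : PySem.Set String) = ([] : List String) := rfl
  rw [he, PySem.Set.update_nil_left]
  congr 1
  rw [List.nil_append, List.filter_map]
  simp only [Function.comp_def, pv_getD_collect, pv_count_keys, pv_zip_filter]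
  simp [List.flatMap_def]
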